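-- pv_equiv track=rewrite | github.com/eb12kim/BNP_NewsAgent | main.py | apply_topic_quotas
-- ===== SOURCE A (Python) =====
-- TOPIC_QUOTA_RATIO = {
--     "company_group": 0.35,
--     "policy_reg": 0.25,
--     "lending": 0.2,
--     "els": 0.1,
--     "product": 0.1,
-- }
--
-- def apply_topic_quotas(news_items: list[dict], target_count: int) -> list[dict]:
--     quotas = {topic: max(1, int(target_count * ratio)) for topic, ratio in TOPIC_QUOTA_RATIO.items()}
--     selected_keys = set()
--     selected = []
--
--     for topic in ["company_group", "policy_reg", "lending", "els", "product"]:
--         count = 0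
--         for item in news_items:
--             if item.get("topic") != topic:
--                 continue
--             key = item.get("link") or item.get("title")
--             if not key or key in selected_keys:
--                 continue
--             selected.append(item)
--             selected_keys.add(key)
--             count += 1
--             if count >= quotas[topic]:
--                 break
--
--     for item in news_items:
--         if len(selected) >= target_count:
--             break
--         key = item.get("link") or item.get("title")
--         if not key or key in selected_keys:
--             continue
--         selected.append(item)
--         selected_keys.add(key)
--
--     return selected
-- ===== SOURCE B (Python) =====
-- TOPIC_QUOTA_RATIO = {
--     "company_group": 0.35,
--     "policy_reg": 0.25,
--     "lending": 0.2,
--     "els": 0.1,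
--     "product": 0.1,
-- }
--
-- _TOPICS = ["company_group", "policy_reg", "lending", "els", "product"]
--
--
-- def _item_key(item):
--     key = item.get("link") or item.get("title")
--     return key if key else None
--
--
-- def apply_topic_quotas(news_items: list, target_count: int) -> list:
--     quotas = {topic: max(1, int(target_count * ratio)) for topic, ratio in TOPIC_QUOTA_RATIO.items()}
--
--     # One bucketing pass: per topic, the (key, item) pairs in encounter order.
--     buckets = {t: [] for t in _TOPICS}
--     for item in news_items:
--         t = item.get("topic")
--         if t in buckets:
--             k = _item_key(item)
--             if k is not None:
--                 buckets[t].append((k, item))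
--
--     selected = []
--     selected_keys = set()
--     for topic in _TOPICS:
--         count = 0
--         for k, item in buckets[topic]:
--             if k in selected_keys:
--                 continue
--             selected.append(item)
--             selected_keys.add(k)
--             count += 1
--             if count >= quotas[topic]:
--                 break
--
--     for item in news_items:
--         if len(selected) >= target_count:
--             break
--         k = _item_key(item)
--         if k is None or k in selected_keys:
--             continue
--         selected.append(item)
--         selected_keys.add(k)
--
--     return selected
-- ===== Notes on version B (the rewrite author's own statement) =====
-- stated objective: alternative
-- what changed: A scans the full news list once per topic (five filtered passes); B makes one bucketing pass that groups items by topic and precomputes each item's dedup key, then drains the per-topic buckets, keeping the same final fill pass.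
import Mathlib
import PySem

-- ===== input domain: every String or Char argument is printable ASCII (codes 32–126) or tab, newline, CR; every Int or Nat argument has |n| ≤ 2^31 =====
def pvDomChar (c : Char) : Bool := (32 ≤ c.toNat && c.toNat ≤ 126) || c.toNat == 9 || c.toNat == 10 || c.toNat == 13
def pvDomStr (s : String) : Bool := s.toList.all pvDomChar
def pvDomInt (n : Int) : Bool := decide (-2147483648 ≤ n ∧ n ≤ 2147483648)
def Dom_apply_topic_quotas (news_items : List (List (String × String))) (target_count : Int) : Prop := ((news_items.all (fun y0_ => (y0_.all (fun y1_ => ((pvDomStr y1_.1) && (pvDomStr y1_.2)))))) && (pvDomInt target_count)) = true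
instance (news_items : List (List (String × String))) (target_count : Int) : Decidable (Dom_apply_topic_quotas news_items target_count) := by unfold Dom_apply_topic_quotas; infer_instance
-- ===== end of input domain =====

-- B replaces A's five full scans of news_items (one per topic) by one bucketing pass that also
-- precomputes each item's dedup key, then drains the per-topic buckets; the final fill pass is kept.
-- Objective: alternative (one bucketing pass instead of five filtered scans).

-- ===== PORT A =====
-- dict lookup item.get(k) (first match on the association list, like a Python dict built from it)
def pvGet (item : List (String × String)) (k : String) : Option String :=
  (PySem.Dict.mk item).get? k

-- key = item.get("link") or item.get("title"); 'if not key' folds None and "" to none.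
-- (shared by both ports: both Pythons compute the key with exactly these two lines)
def pvKey (item : List (String × String)) : Option String :=
  let key : Option String :=
    match pvGet item "link" with
    | some s => if s = "" then pvGet item "title" else some s
    | none => pvGet item "title"
  match key with
  | some s => if s = "" then none else some s
  | none => none

-- int(t * ratio) where ratio is the IEEE double m/2^e: exact round-to-nearest-even of |t|*m/2^e
-- to 53 significant bits, then truncation toward zero (faithful to CPython's float product).
def pvRoundTrunc (x : Nat) (e : Nat) : Nat :=
  if x = 0 then 0
  else
    let n := Nat.log2 x + 1
    if n ≤ 53 then x / 2 ^ e
    else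
      let s := n - 53
      let q := x / 2 ^ s
      let r := x % 2 ^ s
      let half := 2 ^ (s - 1)
      let q' := if half < r ∨ (r = half ∧ q % 2 = 1) then q + 1 else q
      (q' * 2 ^ s) / 2 ^ e

def pvIntTrunc (t : Int) (m e : Nat) : Int :=
  let v := pvRoundTrunc (t.natAbs * m) e
  if t < 0 then -(v : Int) else (v : Int)

-- max(1, int(target_count * ratio))
def pvQuota (t : Int) (m e : Nat) : Int := max 1 (pvIntTrunc t m e)

-- quotas = {topic: max(1, int(target_count * ratio))} in TOPIC_QUOTA_RATIO order; the outer
-- 'for topic in [...]' visits exactly these keys in this order, so the (topic, quota) pairs are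
-- paired up here once (shared: both Pythons build the identical comprehension).
-- doubles: 0.35 = 6305039478318694/2^54, 0.25 = 4503599627370496/2^54,
--          0.2 = 7205759403792794/2^55, 0.1 = 7205759403792794/2^56
def pvQuotas (t : Int) : List (String × Int) :=
  [("company_group", pvQuota t 6305039478318694 54),
   ("policy_reg", pvQuota t 4503599627370496 54),
   ("lending", pvQuota t 7205759403792794 55),
   ("els", pvQuota t 7205759403792794 56),
   ("product", pvQuota t 7205759403792794 56)]

-- A's inner loop for one topic: scan all of news_items, keep items of this topic with a fresh key,
-- break once count reaches the quota
def pvLoopA (topic : String) (quota : Int) :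
    List (List (String × String)) → Int → List (List (String × String)) → PySem.Set String →
    List (List (String × String)) × PySem.Set String
  | [], _, sel, keys => (sel, keys)
  | item :: rest, count, sel, keys =>
    if pvGet item "topic" ≠ some topic then pvLoopA topic quota rest count sel keys
    else
      match pvKey item with
      | none => pvLoopA topic quota rest count sel keys
      | some k =>
        if PySem.Set.contains keys k then pvLoopA topic quota rest count sel keys
        else if count + 1 ≥ quota then (sel ++ [item], PySem.Set.add keys k)
        else pvLoopA topic quota rest (count + 1) (sel ++ [item]) (PySem.Set.add keys k)

-- the final fill pass (textually identical in A and in B, so shared)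
def pvFill (target : Int) :
    List (List (String × String)) → List (List (String × String)) → PySem.Set String →
    List (List (String × String))
  | [], sel, _ => sel
  | item :: rest, sel, keys =>
    if PySem.List.len sel ≥ target then sel
    else
      match pvKey item with
      | none => pvFill target rest sel keys
      | some k =>
        if PySem.Set.contains keys k then pvFill target rest sel keys
        else pvFill target rest (sel ++ [item]) (PySem.Set.add keys k)

def apply_topic_quotas (news_items : List (List (String × String))) (target_count : Int) :
    List (List (String × String)) :=
  let st := (pvQuotas target_count).foldl
    (fun (st : List (List (String × String)) × PySem.Set String) tq =>
      pvLoopA tq.1 tq.2 news_items 0 st.1 st.2)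
    ([], PySem.Set.empty)
  pvFill target_count news_items st.1 st.2

-- ===== PORT B =====
-- buckets = {t: [] for t in TOPICS}
def pvBucketInit : PySem.Dict String (List (String × List (String × String))) :=
  PySem.Dict.mk
    [("company_group", []), ("policy_reg", []), ("lending", []), ("els", []), ("product", [])]

-- one iteration of B's bucketing pass: t = item.get("topic"); if t in buckets and the item has a
-- key, append (key, item) to its bucket
def pvBucketStep (d : PySem.Dict String (List (String × List (String × String))))
    (item : List (String × String)) : PySem.Dict String (List (String × List (String × String))) :=
  match pvGet item "topic" with
  | some tp =>
    if d.contains tp then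
      match pvKey item with
      | some k => d.modify tp [] (fun b => b ++ [(k, item)])
      | none => d
    else d
  | none => d

-- B's inner loop for one topic: drain the bucket's (key, item) pairs
def pvLoopB (quota : Int) :
    List (String × List (String × String)) → Int → List (List (String × String)) →
    PySem.Set String → List (List (String × String)) × PySem.Set String
  | [], _, sel, keys => (sel, keys)
  | (k, item) :: rest, count, sel, keys =>
    if PySem.Set.contains keys k then pvLoopB quota rest count sel keys
    else if count + 1 ≥ quota then (sel ++ [item], PySem.Set.add keys k)
    else pvLoopB quota rest (count + 1) (sel ++ [item]) (PySem.Set.add keys k)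

def apply_topic_quotas_alt (news_items : List (List (String × String))) (target_count : Int) :
    List (List (String × String)) :=
  let buckets := news_items.foldl pvBucketStep pvBucketInit
  let st := (pvQuotas target_count).foldl
    (fun (st : List (List (String × String)) × PySem.Set String) tq =>
      pvLoopB tq.2 (buckets.getD tq.1 []) 0 st.1 st.2)
    ([], PySem.Set.empty)
  pvFill target_count news_items st.1 st.2

-- ===== PRECONDITION & SPEC =====
def Spec_apply_topic_quotas (news_items : List (List (String × String))) (target_count : Int) (out : List (List (String × String))) : Prop := out = apply_topic_quotas_alt news_items target_count
instance (news_items : List (List (String × String))) (target_count : Int) (out : List (List (String × String))) : Decidable (Spec_apply_topic_quotas news_items target_count out) := by unfold Spec_apply_topic_quotas; infer_instance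

-- ===== CLAIM (what is proved, stated in full; the proofs are below) =====
def Claim_equal_apply_topic_quotas : Prop := ∀ (news_items : List (List (String × String))) (target_count : Int), Dom_apply_topic_quotas news_items target_count → Spec_apply_topic_quotas news_items target_count (apply_topic_quotas news_items target_count)

-- ===== LEMMAS AND PROOFS =====
-- the five topics (used only by the proofs)
def pvTopics : List String := ["company_group", "policy_reg", "lending", "els", "product"]

-- the (key, item) pairs A's inner loop for topic t actually processes, in encounter order
def pvPairs (t : String) (news : List (List (String × String))) :
    List (String × List (String × String)) :=
  news.filterMap (fun item =>
    if pvGet item "topic" = some t then (pvKey item).map (fun k => (k, item)) else none)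

lemma pvBucket_inv (news : List (List (String × String)))
    (d : PySem.Dict String (List (String × List (String × String))))
    (hc : ∀ s, d.contains s = true ↔ s ∈ pvTopics) :
    ∀ t ∈ pvTopics, (news.foldl pvBucketStep d).getD t [] = d.getD t [] ++ pvPairs t news := by
  induction news generalizing d with
  | nil => intro t _; simp [pvPairs]
  | cons item rest ih =>
    intro t ht
    have hstep : ∀ s, (pvBucketStep d item).contains s = true ↔ s ∈ pvTopics := by
      intro s
      cases hg : pvGet item "topic" with
      | none => simpa [pvBucketStep, hg] using hc s
      | some tp =>
        by_cases hin : d.contains tp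
        · cases hk : pvKey item with
          | none => simpa [pvBucketStep, hg, hk, hin] using hc s
          | some k =>
            simp only [pvBucketStep, hg, hk, hin, if_true, PySem.Dict.contains_modify,
              Bool.or_eq_true, beq_iff_eq]
            constructor
            · rintro (rfl | h)
              · exact (hc s).mp hin
              · exact (hc s).mp h
            · intro hs
              exact Or.inr ((hc s).mpr hs)
        · simpa [pvBucketStep, hg, hin] using hc s
    have hgetD : (pvBucketStep d item).getD t [] =
        d.getD t [] ++
          (if pvGet item "topic" = some t then ((pvKey item).map (fun k => (k, item))).toList else []) := by
      cases hg : pvGet item "topic" with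
      | none => simp [pvBucketStep, hg]
      | some tp =>
        by_cases hin : d.contains tp
        · cases hk : pvKey item with
          | none => simp [pvBucketStep, hg, hk, hin]
          | some k =>
            have hred : pvBucketStep d item = d.modify tp [] (fun b => b ++ [(k, item)]) := by
              simp [pvBucketStep, hg, hk, hin]
            rw [hred]
            rcases eq_or_ne tp t with rfl | htp
            · rw [PySem.Dict.getD_modify_self]
              simp
            · rw [PySem.Dict.getD_modify_of_ne _ _ _ (Ne.symm htp)]
              simp [htp]
        · have htp : tp ≠ t := fun h => hin (by rw [h]; exact (hc t).mpr ht)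
          simp [pvBucketStep, hg, hin, htp]
    have hpairs : pvPairs t (item :: rest) =
        (if pvGet item "topic" = some t then ((pvKey item).map (fun k => (k, item))).toList else [])
          ++ pvPairs t rest := by
      simp only [pvPairs, List.filterMap_cons]
      split_ifs with h
      · cases pvKey item <;> simp
      · simp
    have hrest := ih (pvBucketStep d item) hstep t ht
    rw [List.foldl_cons, hrest, hgetD, hpairs, List.append_assoc]

lemma pvBucketInit_contains : ∀ s, pvBucketInit.contains s = true ↔ s ∈ pvTopics := by
  intro s
  simp only [pvBucketInit, PySem.Dict.contains_mk, pvTopics]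
  simp only [List.any_cons, List.any_nil, Bool.or_eq_true, beq_iff_eq, Bool.false_eq_true,
    or_false, List.mem_cons, List.not_mem_nil]
  constructor
  · rintro (h | h | h | h | h)
    · exact Or.inl h.symm
    · exact Or.inr (Or.inl h.symm)
    · exact Or.inr (Or.inr (Or.inl h.symm))
    · exact Or.inr (Or.inr (Or.inr (Or.inl h.symm)))
    · exact Or.inr (Or.inr (Or.inr (Or.inr h.symm)))
  · rintro (h | h | h | h | h)
    · exact Or.inl h.symm
    · exact Or.inr (Or.inl h.symm)
    · exact Or.inr (Or.inr (Or.inl h.symm))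
    · exact Or.inr (Or.inr (Or.inr (Or.inl h.symm)))
    · exact Or.inr (Or.inr (Or.inr (Or.inr h.symm)))

lemma pvLoopB_eq_pvLoopA (t : String) (quota : Int) :
    ∀ (news : List (List (String × String))) (count : Int)
      (sel : List (List (String × String))) (keys : PySem.Set String),
      pvLoopB quota (pvPairs t news) count sel keys = pvLoopA t quota news count sel keys := by
  intro news
  induction news with
  | nil => intro count sel keys; simp [pvPairs, pvLoopB, pvLoopA]
  | cons item rest ih =>
    intro count sel keys
    by_cases hg : pvGet item "topic" = some t
    · cases hk : pvKey item with
      | none =>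
        have hp : pvPairs t (item :: rest) = pvPairs t rest := by
          simp [pvPairs, hg, hk]
        rw [hp, ih]
        simp [pvLoopA, hg, hk]
      | some k =>
        have hp : pvPairs t (item :: rest) = (k, item) :: pvPairs t rest := by
          simp [pvPairs, hg, hk]
        have hA : pvLoopA t quota (item :: rest) count sel keys =
            (if PySem.Set.contains keys k then pvLoopA t quota rest count sel keys
             else if count + 1 ≥ quota then (sel ++ [item], PySem.Set.add keys k)
             else pvLoopA t quota rest (count + 1) (sel ++ [item]) (PySem.Set.add keys k)) := by
          simp [pvLoopA, hg, hk]
        have hB : pvLoopB quota ((k, item) :: pvPairs t rest) count sel keys =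
            (if PySem.Set.contains keys k then pvLoopB quota (pvPairs t rest) count sel keys
             else if count + 1 ≥ quota then (sel ++ [item], PySem.Set.add keys k)
             else pvLoopB quota (pvPairs t rest) (count + 1) (sel ++ [item]) (PySem.Set.add keys k)) := rfl
        rw [hp, hB, hA]
        by_cases hm : PySem.Set.contains keys k
        · rw [if_pos hm, if_pos hm, ih]
        · rw [if_neg hm, if_neg hm]
          by_cases hq : count + 1 ≥ quota
          · rw [if_pos hq, if_pos hq]
          · rw [if_neg hq, if_neg hq, ih]
    · have hp : pvPairs t (item :: rest) = pvPairs t rest := by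
        simp [pvPairs, hg]
      rw [hp, ih]
      simp [pvLoopA, hg]

lemma pvBuckets_getD (news : List (List (String × String))) (t : String) (ht : t ∈ pvTopics) :
    (news.foldl pvBucketStep pvBucketInit).getD t [] = pvPairs t news := by
  have h := pvBucket_inv news pvBucketInit pvBucketInit_contains t ht
  have h0 : pvBucketInit.getD t [] = [] := by
    fin_cases ht <;> rfl
  rw [h, h0, List.nil_append]

-- ===== VERDICT (by name: the statement is the Claim_ definition above) =====
theorem apply_topic_quotas_spec : Claim_equal_apply_topic_quotas := by
  intro news t _
  unfold Spec_apply_topic_quotas apply_topic_quotas apply_topic_quotas_alt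
  simp only [pvQuotas, List.foldl_cons, List.foldl_nil]
  rw [pvBuckets_getD news "company_group" (by decide),
      pvBuckets_getD news "policy_reg" (by decide),
      pvBuckets_getD news "lending" (by decide),
      pvBuckets_getD news "els" (by decide),
      pvBuckets_getD news "product" (by decide)]
  rw [pvLoopB_eq_pvLoopA, pvLoopB_eq_pvLoopA, pvLoopB_eq_pvLoopA, pvLoopB_eq_pvLoopA,
      pvLoopB_eq_pvLoopA]
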